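-- pv_equiv track=rewrite | github.com/meldontaragon/astcardcalc | cardcalc.py | get_real_damages
-- ===== SOURCE A (Python) =====
-- def get_real_damages(damages, tick_damages, pets):
--     """
--     Combines the two arguments, since cards work with pet damage
--     this also needs to add in the tick damage from pets
--     """
--     real_damages = {}
--     for source in damages.keys():
--         if source in tick_damages:
--             real_damages[source] = damages[source] + tick_damages[source]
--         else:
--             real_damages[source] = damages[source]
--
--     # search through pets for those owned by anyone in the damage
--     # sources (this isn't elegant but it works for now)
--     for pet in pets:
--         if pets[pet]['petOwner'] in damages.keys() and pet in tick_damages: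
--             real_damages[pets[pet]['petOwner']] += tick_damages[pet]
--
--     return real_damages
-- ===== SOURCE B (Python) =====
-- def get_real_damages(damages, tick_damages, pets):
--     # Route each tick entry to its beneficiaries in ONE pass over tick_damages.
--     extra = {}
--     for t, v in tick_damages.items():
--         if t in damages:
--             extra[t] = extra.get(t, 0) + v
--         if t in pets and pets[t]['petOwner'] in damages:
--             o = pets[t]['petOwner']
--             extra[o] = extra.get(o, 0) + v
--     return {s: d + extra.get(s, 0) for s, d in damages.items()}
-- ===== Notes on version B (the rewrite author's own statement) =====
-- stated objective: alternative
-- what changed: B inverts the data flow: instead of A's two passes (copy damages adding direct ticks, then scan all pets mutating owners in place), B makes a single pass over tick_damages routing each tick entry to its beneficiary (itself if a damage source, its owner if it is a pet) into an extra dict, then combines; the loop over pets disappears entirely.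
import Mathlib
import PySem

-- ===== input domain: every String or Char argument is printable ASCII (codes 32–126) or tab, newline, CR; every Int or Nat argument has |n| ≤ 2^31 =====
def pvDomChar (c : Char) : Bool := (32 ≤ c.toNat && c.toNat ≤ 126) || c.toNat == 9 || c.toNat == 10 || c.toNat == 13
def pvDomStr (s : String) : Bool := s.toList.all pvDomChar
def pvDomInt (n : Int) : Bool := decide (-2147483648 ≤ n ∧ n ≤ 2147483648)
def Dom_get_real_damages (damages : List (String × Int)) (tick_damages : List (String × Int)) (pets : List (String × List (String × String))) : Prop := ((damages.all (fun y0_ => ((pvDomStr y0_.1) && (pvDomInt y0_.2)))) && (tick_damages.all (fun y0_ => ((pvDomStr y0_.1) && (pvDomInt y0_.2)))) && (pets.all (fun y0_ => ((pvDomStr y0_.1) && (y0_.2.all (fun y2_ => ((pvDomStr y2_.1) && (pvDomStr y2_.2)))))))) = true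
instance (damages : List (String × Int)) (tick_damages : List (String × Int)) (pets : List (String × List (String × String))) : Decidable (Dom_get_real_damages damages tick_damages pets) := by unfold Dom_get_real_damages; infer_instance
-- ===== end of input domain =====

-- B replaces A's two passes (copy damages adding direct ticks, then scan ALL pets mutating
-- owners in place) by ONE pass over tick_damages that routes each tick entry to its
-- beneficiaries (itself if a damage source, its owner if it is a pet) into an 'extra' dict,
-- then one combining pass over damages; return values only.

-- ===== PORT A =====
-- pets[pet]['petOwner'] raises KeyError when absent; Pre_ excludes that, so the
-- default "" below is never the value actually used on admitted inputs.
def pvOwner (pD : PySem.Dict String (List (String × String))) (pet : String) : String :=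
  (PySem.Dict.ofList (pD.getD pet [])).getD "petOwner" ""

def get_real_damages (damages : List (String × Int)) (tick_damages : List (String × Int)) (pets : List (String × List (String × String))) : List (String × Int) :=
  let dD := PySem.Dict.ofList damages
  let tD := PySem.Dict.ofList tick_damages
  let pD := PySem.Dict.ofList pets
  -- first loop: real_damages[source] = damages[source] (+ tick_damages[source] if present)
  let rd := dD.keys.foldl (fun rd source =>
      if tD.contains source then rd.insert source (dD.getD source 0 + tD.getD source 0)
      else rd.insert source (dD.getD source 0)) PySem.Dict.empty
  -- second loop: real_damages[pets[pet]['petOwner']] += tick_damages[pet]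
  let rd := pD.keys.foldl (fun rd pet =>
      if dD.keys.contains (pvOwner pD pet) && tD.contains pet then
        rd.modify (pvOwner pD pet) 0 (fun x => x + tD.getD pet 0)
      else rd) rd
  rd.items

-- ===== PORT B =====
def get_real_damages_alt (damages : List (String × Int)) (tick_damages : List (String × Int)) (pets : List (String × List (String × String))) : List (String × Int) :=
  let dD := PySem.Dict.ofList damages
  let pD := PySem.Dict.ofList pets
  -- for t, v in tick_damages.items(): route v to t (if a damage source) and to t's owner (if t is a pet)
  let extra := (PySem.Dict.ofList tick_damages).items.foldl (fun ex tv =>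
      let ex := if dD.contains tv.1 then ex.modify tv.1 0 (fun x => x + tv.2) else ex
      if pD.contains tv.1 && dD.contains (pvOwner pD tv.1) then
        ex.modify (pvOwner pD tv.1) 0 (fun x => x + tv.2)
      else ex) PySem.Dict.empty
  -- {s: d + extra.get(s, 0) for s, d in damages.items()}
  dD.items.map (fun sd => (sd.1, sd.2 + extra.getD sd.1 0))

-- ===== PRECONDITION & SPEC =====
-- Pre_ : every pet's (dict-collapsed) attribute dict has the key 'petOwner';
-- A looks it up for every pet unconditionally, so A raises KeyError exactly outside Pre_.
def Pre_get_real_damages (damages : List (String × Int)) (tick_damages : List (String × Int)) (pets : List (String × List (String × String))) : Prop :=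
  ((PySem.Dict.ofList pets).items.all (fun p => p.2.any (fun q => q.1 == "petOwner"))) = true
instance (damages : List (String × Int)) (tick_damages : List (String × Int)) (pets : List (String × List (String × String))) : Decidable (Pre_get_real_damages damages tick_damages pets) := by unfold Pre_get_real_damages; infer_instance

def pvWitness_get_real_damages : (List (String × Int)) × (List (String × Int)) × (List (String × List (String × String))) :=
  ([("a", 3)], [("p", 2)], [("p", [("petOwner", "a")])])

def Spec_get_real_damages (damages : List (String × Int)) (tick_damages : List (String × Int)) (pets : List (String × List (String × String))) (out : List (String × Int)) : Prop := out = get_real_damages_alt damages tick_damages pets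
instance (damages : List (String × Int)) (tick_damages : List (String × Int)) (pets : List (String × List (String × String))) (out : List (String × Int)) : Decidable (Spec_get_real_damages damages tick_damages pets out) := by unfold Spec_get_real_damages; infer_instance

-- ===== CLAIM (what is proved, stated in full; the proofs are below) =====
def Claim_equal_get_real_damages : Prop := ∀ (damages : List (String × Int)) (tick_damages : List (String × Int)) (pets : List (String × List (String × String))), Dom_get_real_damages damages tick_damages pets → Pre_get_real_damages damages tick_damages pets → Spec_get_real_damages damages tick_damages pets (get_real_damages damages tick_damages pets)

-- ===== LEMMAS AND PROOFS =====

-- one conditional accumulate step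
theorem pv_getD_cmod (d : PySem.Dict String Int) (c : Bool) (k s : String) (v : Int) :
    (if c then d.modify k 0 (fun x => x + v) else d).getD s 0
      = d.getD s 0 + (if c && (k == s) then v else 0) := by
  by_cases hc : c = true
  · rw [if_pos hc, PySem.Dict.getD_modify]
    by_cases hk : s = k
    · simp [hk, hc]
    · have : (k == s) = false := by
        simp only [beq_eq_false_iff_ne, ne_eq]; exact fun h => hk h.symm
      simp [hk, this]
  · simp only [Bool.not_eq_true] at hc; simp [hc]

-- A's accumulation loop: final lookup = initial lookup + sum of matching contributions
theorem pv_getD_foldl_modify_if {α : Type} (key : α → String) (c : α → Bool) (w : α → Int) :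
    ∀ (l : List α) (d : PySem.Dict String Int) (s : String),
      (l.foldl (fun b p => if c p then b.modify (key p) 0 (fun x => x + w p) else b) d).getD s 0
        = d.getD s 0 + (l.map (fun p => if c p && (key p == s) then w p else 0)).sum := by
  intro l
  induction l with
  | nil => intro d s; simp
  | cons p t ih =>
    intro d s
    simp only [List.foldl_cons, List.map_cons, List.sum_cons]
    rw [ih, pv_getD_cmod]
    ring

-- B's routing loop: two conditional accumulate steps per tick entry
theorem pv_getD_foldl_modify2 {α : Type} (k1 k2 : α → String) (c1 c2 : α → Bool) (w : α → Int) :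
    ∀ (l : List α) (d : PySem.Dict String Int) (s : String),
      (l.foldl (fun b p =>
          let b1 := if c1 p then b.modify (k1 p) 0 (fun x => x + w p) else b
          if c2 p then b1.modify (k2 p) 0 (fun x => x + w p) else b1) d).getD s 0
        = d.getD s 0 + (l.map (fun p =>
            (if c1 p && (k1 p == s) then w p else 0) + (if c2 p && (k2 p == s) then w p else 0))).sum := by
  intro l
  induction l with
  | nil => intro d s; simp
  | cons p t ih =>
    intro d s
    simp only [List.foldl_cons, List.map_cons, List.sum_cons]
    rw [ih, pv_getD_cmod, pv_getD_cmod]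
    ring

-- keys of A's second loop's accumulator never change (it only modifies contained keys)
theorem pv_keys_loop2 {α : Type} (key : α → String) (K : List String) (c : α → Bool) (w : α → Int) :
    ∀ (l : List α) (d : PySem.Dict String Int), d.keys = K →
      (l.foldl (fun b p => if K.contains (key p) && c p then b.modify (key p) 0 (fun x => x + w p) else b) d).keys = K := by
  intro l
  induction l with
  | nil => intro d h; simpa using h
  | cons p t ih =>
    intro d h
    simp only [List.foldl_cons]
    by_cases hc : (K.contains (key p) && c p) = true
    · rw [if_pos hc]
      apply ih
      have hcontains : d.contains (key p) = true := by
        rw [PySem.Dict.contains_iff_mem_keys, h]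
        have h1 : K.contains (key p) = true := by
          simp only [Bool.and_eq_true] at hc; exact hc.1
        exact List.contains_iff_mem.mp h1
      rw [PySem.Dict.keys_modify, PySem.Dict.keys_insert_of_contains d _ hcontains, h]
    · rw [if_neg hc]; exact ih d h

-- sum over a nodup list of a single-key selector
theorem pv_sum_single (s : String) (f : String → Int) :
    ∀ (l : List String), l.Nodup →
      (l.map (fun t => if t == s then f t else 0)).sum = if s ∈ l then f s else 0 := by
  intro l
  induction l with
  | nil => intro _; simp
  | cons a t ih =>
    intro hnd
    have hnd' := (List.nodup_cons.mp hnd)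
    simp only [List.map_cons, List.sum_cons]
    by_cases ha : a = s
    · subst ha
      have htail : (t.map (fun x => if x == a then f x else 0)).sum = 0 := by
        apply List.sum_eq_zero
        intro x hx
        obtain ⟨y, hy, hxy⟩ := List.mem_map.mp hx
        have : (y == a) = false := by
          simp only [beq_eq_false_iff_ne, ne_eq]
          exact fun h => hnd'.1 (h ▸ hy)
        rw [← hxy, this]; simp
      rw [htail]
      simp
    · have : (a == s) = false := by simp [ha]
      rw [this, ih hnd'.2]
      simp [Ne.symm ha]

-- a guarded sum is a sum over the filtered list
theorem pv_sum_filter (p : String → Bool) (f : String → Int) :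
    ∀ (l : List String),
      (l.map (fun t => if p t then f t else 0)).sum = ((l.filter p).map f).sum := by
  intro l
  induction l with
  | nil => simp
  | cons a t ih =>
    simp only [List.map_cons, List.sum_cons, List.filter_cons]
    by_cases ha : p a = true
    · simp [ha, ih]
    · simp only [Bool.not_eq_true] at ha; simp [ha, ih]

-- summing over the intersection of two nodup lists may be driven from either side
theorem pv_sum_inter (l1 l2 : List String) (h1 : l1.Nodup) (h2 : l2.Nodup) (f : String → Int) :
    (l1.map (fun t => if l2.contains t then f t else 0)).sum
      = (l2.map (fun t => if l1.contains t then f t else 0)).sum := by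
  rw [pv_sum_filter, pv_sum_filter]
  apply List.Perm.sum_eq
  apply List.Perm.map
  rw [List.perm_ext_iff_of_nodup (List.Nodup.filter _ h1) (List.Nodup.filter _ h2)]
  intro a
  simp only [List.mem_filter, List.contains_iff_mem]
  exact ⟨fun h => ⟨h.2, h.1⟩, fun h => ⟨h.2, h.1⟩⟩

-- the core equality, stated on the (zeta/delta-expanded) bodies of the two ports
theorem pv_core (damages tick_damages : List (String × Int)) (pets : List (String × List (String × String))) :
    ((PySem.Dict.ofList pets).keys.foldl (fun rd pet =>
        if (PySem.Dict.ofList damages).keys.contains (pvOwner (PySem.Dict.ofList pets) pet) && (PySem.Dict.ofList tick_damages).contains pet then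
          rd.modify (pvOwner (PySem.Dict.ofList pets) pet) 0 (fun x => x + (PySem.Dict.ofList tick_damages).getD pet 0)
        else rd)
      ((PySem.Dict.ofList damages).keys.foldl (fun rd source =>
          if (PySem.Dict.ofList tick_damages).contains source then
            rd.insert source ((PySem.Dict.ofList damages).getD source 0 + (PySem.Dict.ofList tick_damages).getD source 0)
          else rd.insert source ((PySem.Dict.ofList damages).getD source 0)) PySem.Dict.empty)).items
    = (PySem.Dict.ofList damages).items.map (fun sd => (sd.1, sd.2 +
        ((PySem.Dict.ofList tick_damages).items.foldl (fun ex tv =>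
            let ex := if (PySem.Dict.ofList damages).contains tv.1 then ex.modify tv.1 0 (fun x => x + tv.2) else ex
            if (PySem.Dict.ofList pets).contains tv.1 && (PySem.Dict.ofList damages).contains (pvOwner (PySem.Dict.ofList pets) tv.1) then
              ex.modify (pvOwner (PySem.Dict.ofList pets) tv.1) 0 (fun x => x + tv.2)
            else ex) PySem.Dict.empty).getD sd.1 0)) := by
  set dD := PySem.Dict.ofList damages with hdD
  set tD := PySem.Dict.ofList tick_damages with htD
  set pD := PySem.Dict.ofList pets with hpD
  have hnd : dD.keys.Nodup := PySem.Dict.nodup_keys_ofList damages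
  have htnd : tD.keys.Nodup := PySem.Dict.nodup_keys_ofList tick_damages
  have hpnd : pD.keys.Nodup := PySem.Dict.nodup_keys_ofList pets
  -- A's first loop in insert-normal form
  have hstep1 : (fun (rd : PySem.Dict String Int) source =>
      if tD.contains source then rd.insert source (dD.getD source 0 + tD.getD source 0)
      else rd.insert source (dD.getD source 0))
      = (fun (rd : PySem.Dict String Int) source =>
          rd.insert source (if tD.contains source then dD.getD source 0 + tD.getD source 0 else dD.getD source 0)) := by
    funext rd source; split <;> rfl
  set base : String → Int := fun s => if tD.contains s then dD.getD s 0 + tD.getD s 0 else dD.getD s 0 with hbase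
  set rd1 := dD.keys.foldl (fun rd source =>
      if tD.contains source then rd.insert source (dD.getD source 0 + tD.getD source 0)
      else rd.insert source (dD.getD source 0)) PySem.Dict.empty with hrd1
  have hitems1 : rd1.items = dD.keys.map (fun s => (s, base s)) := by
    rw [hrd1, hstep1]
    exact PySem.Dict.items_foldl_insert_fresh dD.keys (fun s => s) (fun s => base s)
      PySem.Dict.empty (by intro a _; simp) (by simpa using hnd)
  have hkeys1 : rd1.keys = dD.keys := by
    show rd1.items.map (·.1) = dD.keys
    rw [hitems1, List.map_map]
    have hfun : ((fun x : String × Int => x.1) ∘ fun s : String => (s, base s)) = fun s : String => s := rfl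
    rw [hfun]
    exact List.map_id' dD.keys
  have hgetD1 : ∀ s, rd1.getD s 0 = if s ∈ dD.keys then base s else 0 := by
    intro s
    by_cases hs : s ∈ dD.keys
    · rw [if_pos hs]
      have hmem : (s, base s) ∈ rd1.items := by
        rw [hitems1]; exact List.mem_map.mpr ⟨s, hs, rfl⟩
      exact PySem.Dict.getD_of_mem_items rd1 hmem (by rw [hkeys1]; exact hnd) 0
    · rw [if_neg hs]
      apply PySem.Dict.getD_of_not_contains
      rw [← Bool.not_eq_true, PySem.Dict.contains_iff_mem_keys, hkeys1]
      exact hs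
  -- A's second loop
  set S2 : String → Int := fun s =>
    (pD.keys.map (fun pet => if (dD.keys.contains (pvOwner pD pet) && tD.contains pet) && (pvOwner pD pet == s) then tD.getD pet 0 else 0)).sum with hS2
  set rd2 := pD.keys.foldl (fun rd pet =>
      if dD.keys.contains (pvOwner pD pet) && tD.contains pet then
        rd.modify (pvOwner pD pet) 0 (fun x => x + tD.getD pet 0)
      else rd) rd1 with hrd2
  have hkeys2 : rd2.keys = dD.keys :=
    pv_keys_loop2 (pvOwner pD) dD.keys (fun pet => tD.contains pet) (fun pet => tD.getD pet 0) pD.keys rd1 hkeys1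
  have hgetD2 : ∀ s, rd2.getD s 0 = rd1.getD s 0 + S2 s :=
    fun s => pv_getD_foldl_modify_if (pvOwner pD)
      (fun pet => dD.keys.contains (pvOwner pD pet) && tD.contains pet)
      (fun pet => tD.getD pet 0) pD.keys rd1 s
  -- B's routing loop over tick_damages
  set extra := tD.items.foldl (fun ex tv =>
      let ex := if dD.contains tv.1 then ex.modify tv.1 0 (fun x => x + tv.2) else ex
      if pD.contains tv.1 && dD.contains (pvOwner pD tv.1) then
        ex.modify (pvOwner pD tv.1) 0 (fun x => x + tv.2)
      else ex) PySem.Dict.empty with hextra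
  have htitems : tD.items = tD.keys.map (fun k => (k, tD.getD k 0)) :=
    PySem.Dict.items_eq_map_keys tD htnd 0
  have hextraD : ∀ s, s ∈ dD.keys → extra.getD s 0
      = (if tD.contains s then tD.getD s 0 else 0) + S2 s := by
    intro s hs
    have h0 := pv_getD_foldl_modify2 (fun tv : String × Int => tv.1)
        (fun tv : String × Int => pvOwner pD tv.1)
        (fun tv : String × Int => dD.contains tv.1)
        (fun tv : String × Int => pD.contains tv.1 && dD.contains (pvOwner pD tv.1))
        (fun tv : String × Int => tv.2)
        tD.items PySem.Dict.empty s
    rw [hextra]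
    rw [h0, htitems, List.map_map, PySem.Dict.getD_empty]
    have hsplit : ∀ (l : List String) (g1 g2 : String → Int),
        (l.map (fun t => g1 t + g2 t)).sum = (l.map g1).sum + (l.map g2).sum := by
      intro l g1 g2
      induction l with
      | nil => simp
      | cons a t ih => simp only [List.map_cons, List.sum_cons, ih]; ring
    have hcomp : ((fun tv : String × Int =>
          (if dD.contains tv.1 && (tv.1 == s) then tv.2 else 0)
          + (if (pD.contains tv.1 && dD.contains (pvOwner pD tv.1)) && (pvOwner pD tv.1 == s) then tv.2 else 0))
        ∘ (fun k : String => (k, tD.getD k 0)))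
        = fun t : String =>
          (if dD.contains t && (t == s) then tD.getD t 0 else 0)
          + (if (pD.contains t && dD.contains (pvOwner pD t)) && (pvOwner pD t == s) then tD.getD t 0 else 0) := rfl
    rw [hcomp, hsplit, zero_add]
    -- first summand: direct tick for s
    have h1 : (tD.keys.map (fun t => if dD.contains t && (t == s) then tD.getD t 0 else 0)).sum
        = if tD.contains s then tD.getD s 0 else 0 := by
      have hcg : tD.keys.map (fun t => if dD.contains t && (t == s) then tD.getD t 0 else 0)
          = tD.keys.map (fun t => if t == s then tD.getD t 0 else 0) := by
        apply List.map_congr_left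
        intro t _
        by_cases ht : (t == s) = true
        · have : dD.contains t = true := by
            rw [(beq_iff_eq).mp ht, PySem.Dict.contains_iff_mem_keys]; exact hs
          simp [ht, this]
        · simp [ht]
      rw [hcg, pv_sum_single s (fun t => tD.getD t 0) tD.keys htnd]
      have hiff : s ∈ tD.keys ↔ tD.contains s = true := (PySem.Dict.contains_iff_mem_keys tD s).symm
      by_cases ht : tD.contains s = true
      · rw [if_pos ht, if_pos (hiff.mpr ht)]
      · rw [if_neg ht, if_neg (fun h => ht (hiff.mp h))]
    -- second summand: pet ticks routed to owner s, reindexed from ticks to pets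
    have h2 : (tD.keys.map (fun t => if (pD.contains t && dD.contains (pvOwner pD t)) && (pvOwner pD t == s) then tD.getD t 0 else 0)).sum
        = S2 s := by
      set f : String → Int := fun t =>
        if dD.keys.contains (pvOwner pD t) && (pvOwner pD t == s) then tD.getD t 0 else 0 with hf
      have hcg1 : tD.keys.map (fun t => if (pD.contains t && dD.contains (pvOwner pD t)) && (pvOwner pD t == s) then tD.getD t 0 else 0)
          = tD.keys.map (fun t => if pD.keys.contains t then f t else 0) := by
        apply List.map_congr_left
        intro t _
        by_cases hp : t ∈ pD.keys
        · have hp1 : pD.contains t = true := (PySem.Dict.contains_iff_mem_keys pD t).mpr hp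
          by_cases ho : pvOwner pD t ∈ dD.keys
          · have ho1 : dD.contains (pvOwner pD t) = true := (PySem.Dict.contains_iff_mem_keys dD (pvOwner pD t)).mpr ho
            simp [hp1, hp, ho1, ho, hf]
          · have ho1 : dD.contains (pvOwner pD t) = false := by
              rw [← Bool.not_eq_true, PySem.Dict.contains_iff_mem_keys]; exact ho
            simp [hp1, hp, ho1, ho, hf]
        · have hp1 : pD.contains t = false := by
            rw [← Bool.not_eq_true, PySem.Dict.contains_iff_mem_keys]; exact hp
          simp [hp1, hp]
      rw [hcg1, pv_sum_inter tD.keys pD.keys htnd hpnd f]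
      simp only [hS2]
      refine congrArg List.sum ?_
      apply List.map_congr_left
      intro k _
      by_cases ht : k ∈ tD.keys
      · have ht1 : tD.contains k = true := (PySem.Dict.contains_iff_mem_keys tD k).mpr ht
        simp only [hf]
        by_cases hd1 : dD.keys.contains (pvOwner pD k) = true
        · by_cases hd2 : (pvOwner pD k == s) = true
          · simp [ht, ht1, hd2]
          · simp [ht, ht1, hd2]
        · simp only [Bool.not_eq_true] at hd1
          have hd1m : pvOwner pD k ∉ dD.keys := fun h => by
            rw [List.contains_iff_mem.mpr h] at hd1; exact Bool.true_eq_false.mp hd1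
          simp [ht, hd1m]
      · have ht1 : tD.contains k = false := by
          rw [← Bool.not_eq_true, PySem.Dict.contains_iff_mem_keys]; exact ht
        simp [ht, ht1]
    rw [h1, h2]
  -- final items equality
  have hfinal : rd2.items = dD.keys.map (fun s => (s, rd2.getD s 0)) := by
    have := PySem.Dict.items_eq_map_keys rd2 (by rw [hkeys2]; exact hnd) 0
    rw [hkeys2] at this; exact this
  rw [hfinal, PySem.Dict.items_eq_map_keys dD hnd 0, List.map_map]
  apply List.map_congr_left
  intro s hs
  simp only [Function.comp_apply]
  rw [hgetD2, hgetD1, if_pos hs, hextraD s hs]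
  refine congrArg (Prod.mk s) ?_
  simp only [hbase]
  by_cases ht : tD.contains s = true
  · rw [if_pos ht, if_pos ht]; ring
  · rw [if_neg ht, if_neg ht]; ring

-- ===== VERDICT (by name: the statement is the Claim_ definition above) =====
theorem get_real_damages_spec : Claim_equal_get_real_damages := by
  intro damages tick_damages pets _ _
  show get_real_damages damages tick_damages pets = get_real_damages_alt damages tick_damages pets
  exact pv_core damages tick_damages pets
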